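-- pv_equiv track=rewrite | github.com/Joshspeakman/cheese-the-duck | world/habitat.py | _get_cosmetic_slot
-- ===== SOURCE A (Python) =====
-- def _get_cosmetic_slot(item_id: str) -> str:
--     """Determine which slot a cosmetic goes in."""
--     # Hats and head items
--     head_items = ["hat_", "cap_", "beanie", "crown", "helmet", "wizard", "pirate", "viking",
--                   "party_hat", "flower_crown", "tiara", "graduation", "nurse", "pilot",
--                   "detective", "cat_ears", "bunny_ears", "antenna", "propeller", "jester"]
--     for h in head_items:
--         if h in item_id:
--             return "head"
--
--     # Glasses and face items
--     if "glasses_" in item_id or "sunglasses" in item_id or "monocle" in item_id: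
--         return "eyes"
--
--     # Neck accessories
--     if "bowtie" in item_id or "bow_tie" in item_id or "scarf_" in item_id or "bandana" in item_id:
--         return "neck"
--
--     # Back items
--     if "cape" in item_id or "wings_" in item_id or "backpack" in item_id:
--         return "back"
--
--     # Above head (floating)
--     if "halo" in item_id or "devil_horns" in item_id or "headphones" in item_id:
--         return "above"
--
--     return "head"  # Default to head slot
-- ===== SOURCE B (Python) =====
-- # Slot lookup keyed by the keyword itself: scan the item_id once, position by
-- # position, and look up every candidate substring in a hash table.  Each
-- # keyword carries its priority (table order); the lowest-priority hit wins.
-- _SLOT_TABLE = {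
--     "hat_": (0, "head"), "cap_": (1, "head"), "beanie": (2, "head"),
--     "crown": (3, "head"), "helmet": (4, "head"), "wizard": (5, "head"),
--     "pirate": (6, "head"), "viking": (7, "head"), "party_hat": (8, "head"),
--     "flower_crown": (9, "head"), "tiara": (10, "head"),
--     "graduation": (11, "head"), "nurse": (12, "head"), "pilot": (13, "head"),
--     "detective": (14, "head"), "cat_ears": (15, "head"),
--     "bunny_ears": (16, "head"), "antenna": (17, "head"),
--     "propeller": (18, "head"), "jester": (19, "head"),
--     "glasses_": (20, "eyes"), "sunglasses": (21, "eyes"),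
--     "monocle": (22, "eyes"),
--     "bowtie": (23, "neck"), "bow_tie": (24, "neck"), "scarf_": (25, "neck"),
--     "bandana": (26, "neck"),
--     "cape": (27, "back"), "wings_": (28, "back"), "backpack": (29, "back"),
--     "halo": (30, "above"), "devil_horns": (31, "above"),
--     "headphones": (32, "above"),
-- }
-- _LENGTHS = sorted({len(k) for k in _SLOT_TABLE})
--
--
-- def _get_cosmetic_slot(item_id: str) -> str:
--     """Determine which slot a cosmetic goes in."""
--     best = None
--     for i in range(len(item_id)):
--         for length in _LENGTHS:
--             hit = _SLOT_TABLE.get(item_id[i:i + length])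
--             if hit is not None and (best is None or hit[0] < best[0]):
--                 best = hit
--     return best[1] if best is not None else "head"
-- ===== Notes on version B (the rewrite author's own statement) =====
-- stated objective: alternative
-- what changed: Replaces the keyword-driven scan (try each keyword with 'in' until one matches) by a text-driven scan: walk the positions of item_id once, hash-look-up every candidate substring in a keyword-to-(priority, slot) table, and return the slot of the lowest-priority hit, with the head slot as default.
import Mathlib
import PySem

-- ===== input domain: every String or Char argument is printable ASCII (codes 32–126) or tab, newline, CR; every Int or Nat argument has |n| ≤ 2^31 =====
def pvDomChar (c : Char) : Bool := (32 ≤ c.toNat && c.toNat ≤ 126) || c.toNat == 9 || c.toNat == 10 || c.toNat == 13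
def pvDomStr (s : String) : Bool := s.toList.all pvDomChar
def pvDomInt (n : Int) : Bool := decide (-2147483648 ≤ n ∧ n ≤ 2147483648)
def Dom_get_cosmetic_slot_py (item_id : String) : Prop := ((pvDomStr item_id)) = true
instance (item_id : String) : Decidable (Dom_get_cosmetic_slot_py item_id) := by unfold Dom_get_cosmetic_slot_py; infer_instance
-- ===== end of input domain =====

-- B replaces A's keyword-driven substring tests by a text-driven scan: it walks the
-- positions of item_id once and hash-looks-up each candidate substring in a
-- keyword -> (priority, slot) table, returning the lowest-priority hit's slot.

-- ===== PORT A =====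
def pvHeadItems : List String :=
  ["hat_", "cap_", "beanie", "crown", "helmet", "wizard", "pirate", "viking",
   "party_hat", "flower_crown", "tiara", "graduation", "nurse", "pilot",
   "detective", "cat_ears", "bunny_ears", "antenna", "propeller", "jester"]

-- the 'for h in head_items: if h in item_id: return "head"' loop (early return = Option)
def pvHeadLoop (item_id : String) : List String → Option String
  | [] => none
  | h :: t => if PySem.Str.isIn h item_id then some "head" else pvHeadLoop item_id t

def get_cosmetic_slot_py (item_id : String) : String :=
  match pvHeadLoop item_id pvHeadItems with
  | some r => r
  | none =>
    if PySem.Str.isIn "glasses_" item_id || PySem.Str.isIn "sunglasses" item_id ||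
       PySem.Str.isIn "monocle" item_id then "eyes"
    else if PySem.Str.isIn "bowtie" item_id || PySem.Str.isIn "bow_tie" item_id ||
       PySem.Str.isIn "scarf_" item_id || PySem.Str.isIn "bandana" item_id then "neck"
    else if PySem.Str.isIn "cape" item_id || PySem.Str.isIn "wings_" item_id ||
       PySem.Str.isIn "backpack" item_id then "back"
    else if PySem.Str.isIn "halo" item_id || PySem.Str.isIn "devil_horns" item_id ||
       PySem.Str.isIn "headphones" item_id then "above"
    else "head"

-- ===== PORT B =====
-- _SLOT_TABLE: keyword -> (priority, slot)
def pvSlotTable : PySem.Dict String (Int × String) := PySem.Dict.ofList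
  [("hat_", (0, "head")), ("cap_", (1, "head")), ("beanie", (2, "head")),
   ("crown", (3, "head")), ("helmet", (4, "head")), ("wizard", (5, "head")),
   ("pirate", (6, "head")), ("viking", (7, "head")), ("party_hat", (8, "head")),
   ("flower_crown", (9, "head")), ("tiara", (10, "head")),
   ("graduation", (11, "head")), ("nurse", (12, "head")), ("pilot", (13, "head")),
   ("detective", (14, "head")), ("cat_ears", (15, "head")),
   ("bunny_ears", (16, "head")), ("antenna", (17, "head")),
   ("propeller", (18, "head")), ("jester", (19, "head")),
   ("glasses_", (20, "eyes")), ("sunglasses", (21, "eyes")),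
   ("monocle", (22, "eyes")),
   ("bowtie", (23, "neck")), ("bow_tie", (24, "neck")), ("scarf_", (25, "neck")),
   ("bandana", (26, "neck")),
   ("cape", (27, "back")), ("wings_", (28, "back")), ("backpack", (29, "back")),
   ("halo", (30, "above")), ("devil_horns", (31, "above")),
   ("headphones", (32, "above"))]

-- _LENGTHS = sorted({len(k) for k in _SLOT_TABLE}), evaluated: the distinct keyword lengths
def pvLengths : List Int := [4, 5, 6, 7, 8, 9, 10, 11, 12]

def get_cosmetic_slot_py_alt (item_id : String) : String :=
  let best := (PySem.List.pyRange 0 (PySem.Str.len item_id) 1).foldl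
    (fun best i => pvLengths.foldl
      (fun best length =>
        match pvSlotTable.get? (PySem.Str.slice item_id (some i) (some (i + length))) with
        | some hit =>
          match best with
          | none => some hit
          | some b => if hit.1 < b.1 then some hit else best
        | none => best)
      best)
    (none : Option (Int × String))
  match best with
  | some b => b.2
  | none => "head"

-- ===== PRECONDITION & SPEC =====
def Spec_get_cosmetic_slot_py (item_id : String) (out : String) : Prop := out = get_cosmetic_slot_py_alt item_id
instance (item_id : String) (out : String) : Decidable (Spec_get_cosmetic_slot_py item_id out) := by unfold Spec_get_cosmetic_slot_py; infer_instance

-- ===== CLAIM (what is proved, stated in full; the proofs are below) =====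
def Claim_equal_get_cosmetic_slot_py : Prop := ∀ (item_id : String), Dom_get_cosmetic_slot_py item_id → Spec_get_cosmetic_slot_py item_id (get_cosmetic_slot_py item_id)

-- ===== LEMMAS AND PROOFS =====

-- the flat (keyword, priority, slot) table, = pvSlotTable.items
def pvFlat : List (String × Int × String) :=
  [("hat_", 0, "head"), ("cap_", 1, "head"), ("beanie", 2, "head"),
   ("crown", 3, "head"), ("helmet", 4, "head"), ("wizard", 5, "head"),
   ("pirate", 6, "head"), ("viking", 7, "head"), ("party_hat", 8, "head"),
   ("flower_crown", 9, "head"), ("tiara", 10, "head"),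
   ("graduation", 11, "head"), ("nurse", 12, "head"), ("pilot", 13, "head"),
   ("detective", 14, "head"), ("cat_ears", 15, "head"),
   ("bunny_ears", 16, "head"), ("antenna", 17, "head"),
   ("propeller", 18, "head"), ("jester", 19, "head"),
   ("glasses_", 20, "eyes"), ("sunglasses", 21, "eyes"),
   ("monocle", 22, "eyes"),
   ("bowtie", 23, "neck"), ("bow_tie", 24, "neck"), ("scarf_", 25, "neck"),
   ("bandana", 26, "neck"),
   ("cape", 27, "back"), ("wings_", 28, "back"), ("backpack", 29, "back"),
   ("halo", 30, "above"), ("devil_horns", 31, "above"),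
   ("headphones", 32, "above")]

-- first-match scan over the flat table (reference semantics both programs meet)
def pvFirst (s : String) : List (String × Int × String) → String
  | [] => "head"
  | e :: t => if PySem.Str.isIn e.1 s then e.2.2 else pvFirst s t

def pvMinP (acc : Option (Int × String)) (hit : Int × String) : Option (Int × String) :=
  match acc with
  | none => some hit
  | some b => if hit.1 < b.1 then some hit else some b

def pvLookup (s : String) (p : Int × Int) : Option (Int × String) :=
  pvSlotTable.get? (PySem.Str.slice s (some p.1) (some (p.1 + p.2)))

def pvPairs (s : String) : List (Int × Int) :=
  (PySem.List.pyRange 0 (PySem.Str.len s) 1).flatMap (fun i => pvLengths.map (fun L => (i, L)))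

set_option maxRecDepth 8000 in
theorem pvFlat_items : pvSlotTable.items = pvFlat := rfl

theorem pvFlat_nodup_keys : (PySem.Dict.keys pvSlotTable).Nodup := by decide

theorem pvFlat_len_mem : ∀ e ∈ pvFlat, ((e.1.toList.length : Int)) ∈ pvLengths ∧ e.1.toList ≠ [] := by decide

theorem pvFlat_pairwise : List.Pairwise (fun a b => a.2.1 < b.2.1) pvFlat := by decide

-- the early-return head loop finds "head" iff some head keyword occurs
theorem pvHeadLoop_eq_any (item_id : String) (ks : List String) :
    pvHeadLoop item_id ks =
      (if ks.any (fun k => PySem.Str.isIn k item_id) then some "head" else none) := by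
  induction ks with
  | nil => rfl
  | cons h t ih =>
    simp only [pvHeadLoop, List.any_cons, ih]
    by_cases hh : PySem.Str.isIn h item_id = true
    · rw [if_pos hh, if_pos]; rw [hh, Bool.true_or]
    · rw [if_neg hh]
      by_cases ht : (t.any fun k => PySem.Str.isIn k item_id) = true
      · rw [if_pos ht, if_pos]; rw [ht, Bool.or_true]
      · rw [if_neg ht, if_neg]
        rw [Bool.eq_false_iff.mpr hh, Bool.eq_false_iff.mpr ht]; simp

-- the common shape of A, over abstract group booleans
theorem pvScaffold (H E N Bk Ab : Bool) :
    (match (if H = true then some "head" else (none : Option String)) with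
     | some r => r
     | none =>
       if E = true then "eyes"
       else if N = true then "neck"
       else if Bk = true then "back"
       else if Ab = true then "above"
       else "head")
    = (if H = true then "head"
       else if E = true then "eyes"
       else if N = true then "neck"
       else if Bk = true then "back"
       else if Ab = true then "above"
       else "head") := by
  cases H <;> rfl

theorem pvIfOr (a b : Bool) (x c : String) :
    (if (a || b) = true then x else c) = if a = true then x else if b = true then x else c := by
  cases a <;> simp

-- A is the first-match scan over the flat table
theorem pvA_char (s : String) : get_cosmetic_slot_py s = pvFirst s pvFlat := by
  unfold get_cosmetic_slot_py
  rw [pvHeadLoop_eq_any, pvScaffold]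
  simp only [pvHeadItems, List.any_cons, List.any_nil, Bool.or_false, pvFlat, pvFirst, pvIfOr]

-- a double foldl is a foldl over the product pairs
theorem pvFoldlFoldl {α β γ : Type} (f : γ → α → β → γ) (xs : List α) (ys : List β) (init : γ) :
    xs.foldl (fun acc x => ys.foldl (fun acc y => f acc x y) acc) init
      = (xs.flatMap (fun x => ys.map (fun y => (x, y)))).foldl (fun acc p => f acc p.1 p.2) init := by
  induction xs generalizing init with
  | nil => rfl
  | cons x xs ih =>
    simp only [List.foldl_cons, List.flatMap_cons, List.foldl_append, List.foldl_map, ih]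

-- skipping misses = folding the successful lookups
theorem pvFoldStep (s : String) (ps : List (Int × Int)) (init : Option (Int × String)) :
    ps.foldl (fun acc p => match pvLookup s p with
      | some hit => pvMinP acc hit
      | none => acc) init
      = (ps.filterMap (pvLookup s)).foldl pvMinP init := by
  induction ps generalizing init with
  | nil => rfl
  | cons p ps ih =>
    cases h : pvLookup s p <;> simp only [List.foldl_cons, List.filterMap_cons, h, ih]

-- the min fold returns the unique minimal element
theorem pvFoldMin (hs : List (Int × String)) (m : Int × String)
    (hall : ∀ h ∈ hs, h = m ∨ m.1 < h.1) (acc : Option (Int × String))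
    (hacc : (m ∈ hs ∧ (acc = none ∨ ∃ a, acc = some a ∧ m.1 < a.1)) ∨ acc = some m) :
    hs.foldl pvMinP acc = some m := by
  induction hs generalizing acc with
  | nil =>
    rcases hacc with ⟨hm, _⟩ | h
    · exact absurd hm (List.not_mem_nil)
    · rw [List.foldl_nil]; exact h
  | cons h t ih =>
    have hh := hall h (List.mem_cons_self)
    have hallt : ∀ x ∈ t, x = m ∨ m.1 < x.1 := fun x hx => hall x (List.mem_cons_of_mem _ hx)
    have hne_of_lt : m.1 < h.1 → m ≠ h := fun hlt e => by rw [e] at hlt; exact lt_irrefl _ hlt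
    rw [List.foldl_cons]
    rcases hacc with ⟨hm, hcase⟩ | hacc
    · rcases hcase with rfl | ⟨a, rfl, hma⟩
      · -- acc = none
        rcases hh with he | hlt
        · exact ih hallt _ (Or.inr (by simp [pvMinP, he]))
        · have hmt : m ∈ t := by
            rcases List.mem_cons.mp hm with e | e
            · exact absurd e (hne_of_lt hlt)
            · exact e
          exact ih hallt _ (Or.inl ⟨hmt, Or.inr ⟨h, by simp [pvMinP], hlt⟩⟩)
      · -- acc = some a with m.1 < a.1
        rcases hh with he | hlt
        · exact ih hallt _ (Or.inr (by rw [he]; simp [pvMinP, hma]))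
        · have hmt : m ∈ t := by
            rcases List.mem_cons.mp hm with e | e
            · exact absurd e (hne_of_lt hlt)
            · exact e
          by_cases hb : h.1 < a.1
          · exact ih hallt _ (Or.inl ⟨hmt, Or.inr ⟨h, by simp [pvMinP, hb], hlt⟩⟩)
          · exact ih hallt _ (Or.inl ⟨hmt, Or.inr ⟨a, by simp [pvMinP, hb], hma⟩⟩)
    · -- acc = some m
      rw [hacc]
      rcases hh with he | hlt
      · exact ih hallt _ (Or.inr (by rw [he]; simp [pvMinP]))
      · exact ih hallt _ (Or.inr (by simp [pvMinP, not_lt.mpr (le_of_lt hlt)]))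

-- a successful lookup is a matched table keyword
theorem pvHit_matched (s : String) (p : Int × Int) (h : Int × String)
    (hp1 : 0 ≤ p.1) (hp2 : 0 ≤ p.2) (hl : pvLookup s p = some h) :
    ∃ kw, (kw, h) ∈ pvFlat ∧ PySem.Str.isIn kw s = true := by
  unfold pvLookup at hl
  have hmem : (PySem.Str.slice s (some p.1) (some (p.1 + p.2)), h) ∈ pvSlotTable.items :=
    PySem.Dict.mem_items_of_get?_eq_some _ hl
  rw [pvFlat_items] at hmem
  refine ⟨_, hmem, ?_⟩
  -- the slice is an infix of s
  rw [PySem.Str.isIn_iff_infix]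
  have hlist : (PySem.Str.slice s (some p.1) (some (p.1 + p.2))).toList
      = List.take ((p.1 + p.2).toNat - p.1.toNat) (List.drop p.1.toNat s.toList) := by
    rw [PySem.Str.toList_slice, PySem.Chars.slice_eq_listSlice,
      PySem.List.slice_toNat s.toList hp1 (by omega)]
  rw [hlist]
  exact (List.take_prefix _ _).isInfix.trans (List.drop_suffix _ _).isInfix

-- a matched table keyword produces its pair among the hits
theorem pvMatched_hit (s : String) (e : String × Int × String)
    (he : e ∈ pvFlat) (hm : PySem.Str.isIn e.1 s = true) :
    e.2 ∈ (pvPairs s).filterMap (pvLookup s) := by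
  obtain ⟨hlen, hne⟩ := pvFlat_len_mem e he
  rw [PySem.Str.isIn_iff_infix] at hm
  obtain ⟨u, v, huv⟩ := hm
  have hj : e.1.toList <+: s.toList.drop u.length := by
    rw [← huv, List.append_assoc, List.drop_left]
    exact List.prefix_append _ _
  have hjlt : u.length < s.toList.length := by
    have htot : s.toList.length = u.length + e.1.toList.length + v.length := by
      rw [← huv]; simp only [List.length_append]
    have h1 : 0 < e.1.toList.length := List.length_pos_iff.mpr hne
    omega
  rw [List.mem_filterMap]
  refine ⟨((u.length : Int), (e.1.toList.length : Int)), ?_, ?_⟩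
  · unfold pvPairs
    rw [List.mem_flatMap]
    refine ⟨(u.length : Int), ?_, ?_⟩
    · rw [PySem.List.mem_pyRange_one]
      constructor
      · exact Int.natCast_nonneg _
      · have : PySem.Str.len s = (s.toList.length : Int) := by simp [PySem.Str.len_eq]
        rw [this]
        exact_mod_cast hjlt
    · rw [List.mem_map]
      exact ⟨(e.1.toList.length : Int), hlen, rfl⟩
  · unfold pvLookup
    have hslice : PySem.Str.slice s (some (u.length : Int))
        (some ((u.length : Int) + (e.1.toList.length : Int))) = e.1 := by
      have htl : (PySem.Str.slice s (some (u.length : Int))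
          (some ((u.length : Int) + (e.1.toList.length : Int)))).toList = e.1.toList := by
        rw [PySem.Str.toList_slice, PySem.Chars.slice_eq_listSlice,
          PySem.List.slice_natCast_add]
        exact (List.prefix_iff_eq_take.mp hj).symm
      simpa using congrArg String.ofList htl
    rw [hslice]
    exact PySem.Dict.get?_of_mem_items _ (by rw [pvFlat_items]; exact he) pvFlat_nodup_keys

-- members of pvPairs have nonnegative components
theorem pvPairs_nonneg (s : String) (p : Int × Int) (hp : p ∈ pvPairs s) :
    0 ≤ p.1 ∧ 0 ≤ p.2 := by
  unfold pvPairs at hp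
  rw [List.mem_flatMap] at hp
  obtain ⟨i, hi, hp⟩ := hp
  rw [List.mem_map] at hp
  obtain ⟨L, hL, rfl⟩ := hp
  rw [PySem.List.mem_pyRange_one] at hi
  refine ⟨hi.1, ?_⟩
  fin_cases hL <;> norm_num

-- find? minimality on a priority-sorted list
set_option maxHeartbeats 1000000 in
theorem pvFind?_min (s : String) (l : List (String × Int × String)) (e0 : String × Int × String)
    (hp : List.Pairwise (fun a b => a.2.1 < b.2.1) l)
    (hf : l.find? (fun e => PySem.Str.isIn e.1 s) = some e0) :
    ∀ e ∈ l, PySem.Str.isIn e.1 s = true → e = e0 ∨ e0.2.1 < e.2.1 := by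
  induction l with
  | nil => simp at hf
  | cons h t ih =>
    intro e he hme
    by_cases hh : PySem.Str.isIn h.1 s = true
    · rw [List.find?_cons_of_pos (p := fun e => PySem.Str.isIn e.1 s) (a := h) (l := t) hh] at hf
      injection hf with hf
      subst hf
      rcases List.mem_cons.mp he with rfl | het
      · exact Or.inl rfl
      · exact Or.inr (List.rel_of_pairwise_cons hp het)
    · rw [List.find?_cons_of_neg (p := fun e => PySem.Str.isIn e.1 s) (a := h) (l := t) hh] at hf
      rcases List.mem_cons.mp he with rfl | het
      · exact absurd hme hh
      · exact ih hp.of_cons hf e het hme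

-- pvFirst is find? on slot
set_option maxHeartbeats 1000000 in
theorem pvFirst_eq_find? (s : String) (l : List (String × Int × String)) :
    pvFirst s l = match l.find? (fun e => PySem.Str.isIn e.1 s) with
      | some e => e.2.2
      | none => "head" := by
  induction l with
  | nil => rfl
  | cons h t ih =>
    by_cases hh : PySem.Str.isIn h.1 s = true
    · rw [List.find?_cons_of_pos (p := fun e => PySem.Str.isIn e.1 s) (a := h) (l := t) hh]
      show (if PySem.Str.isIn h.1 s = true then h.2.2 else pvFirst s t) = h.2.2
      rw [if_pos hh]
    · rw [List.find?_cons_of_neg (p := fun e => PySem.Str.isIn e.1 s) (a := h) (l := t) hh]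
      show (if PySem.Str.isIn h.1 s = true then h.2.2 else pvFirst s t) = _
      rw [if_neg hh, ih]

-- B is the first-match scan over the flat table
set_option maxHeartbeats 4000000 in
theorem pvB_char (s : String) : get_cosmetic_slot_py_alt s = pvFirst s pvFlat := by
  have hstepfun :
      (fun (best : Option (Int × String)) (i : Int) => pvLengths.foldl
        (fun best length =>
          match pvSlotTable.get? (PySem.Str.slice s (some i) (some (i + length))) with
          | some hit =>
            match best with
            | none => some hit
            | some b => if hit.1 < b.1 then some hit else best
          | none => best)
        best)
      = (fun best i => pvLengths.foldl
          (fun best length =>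
            match pvLookup s (i, length) with
            | some hit => pvMinP best hit
            | none => best)
          best) := by
    funext best i
    congr 1
    funext acc L
    cases h : pvSlotTable.get? (PySem.Str.slice s (some i) (some (i + L))) <;>
      cases acc <;> simp [pvLookup, pvMinP, h]
  have hfold :
      (PySem.List.pyRange 0 (PySem.Str.len s) 1).foldl
        (fun best i => pvLengths.foldl
          (fun best length =>
            match pvLookup s (i, length) with
            | some hit => pvMinP best hit
            | none => best)
          best)
        (none : Option (Int × String))
      = ((pvPairs s).filterMap (pvLookup s)).foldl pvMinP none := by
    exact (pvFoldlFoldl (fun acc i length =>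
        match pvLookup s (i, length) with
        | some hit => pvMinP acc hit
        | none => acc)
      (PySem.List.pyRange 0 (PySem.Str.len s) 1) pvLengths none).trans
      (pvFoldStep s (pvPairs s) none)
  unfold get_cosmetic_slot_py_alt
  rw [hstepfun, hfold, pvFirst_eq_find?]
  cases hf : pvFlat.find? (fun e => PySem.Str.isIn e.1 s) with
  | none =>
    have hnone : ∀ e ∈ pvFlat, ¬ PySem.Str.isIn e.1 s = true := List.find?_eq_none.mp hf
    have hempty : (pvPairs s).filterMap (pvLookup s) = [] := by
      rw [List.filterMap_eq_nil_iff]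
      intro p hp
      cases hl : pvLookup s p with
      | none => rfl
      | some h =>
        obtain ⟨h1, h2⟩ := pvPairs_nonneg s p hp
        obtain ⟨kw, hkw, hin⟩ := pvHit_matched s p h h1 h2 hl
        exact absurd hin (hnone (kw, h) hkw)
    rw [hempty]
    rfl
  | some e0 =>
    have he0mem : e0 ∈ pvFlat := List.mem_of_find?_eq_some hf
    have he0in : PySem.Str.isIn e0.1 s = true := by
      have := List.find?_some (p := fun e : String × Int × String => PySem.Str.isIn e.1 s) hf
      exact this
    have hmem : e0.2 ∈ (pvPairs s).filterMap (pvLookup s) := pvMatched_hit s e0 he0mem he0in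
    have hall : ∀ h ∈ (pvPairs s).filterMap (pvLookup s), h = e0.2 ∨ e0.2.1 < h.1 := by
      intro h hh
      rw [List.mem_filterMap] at hh
      obtain ⟨p, hp, hl⟩ := hh
      obtain ⟨h1, h2⟩ := pvPairs_nonneg s p hp
      obtain ⟨kw, hkw, hin⟩ := pvHit_matched s p h h1 h2 hl
      rcases pvFind?_min s pvFlat e0 pvFlat_pairwise hf (kw, h) hkw hin with he | hlt
      · exact Or.inl (congrArg Prod.snd he)
      · exact Or.inr hlt
    rw [pvFoldMin _ e0.2 hall none (Or.inl ⟨hmem, Or.inl rfl⟩)]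

-- ===== VERDICT (by name: the statement is the Claim_ definition above) =====
theorem get_cosmetic_slot_py_spec : Claim_equal_get_cosmetic_slot_py := by
  intro item_id _
  unfold Spec_get_cosmetic_slot_py
  rw [pvA_char, pvB_char]
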